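-- pv_equiv track=rewrite | github.com/zoujinhang/py_project | Calculate_duration/get_txx.py | found_txx
-- ===== SOURCE A (Python) =====
-- def found_txx(t,v,st1,st2,base2):
-- 	t1 = []
-- 	for i in range(len(t)):
-- 		if v[i] >= st1:
-- 			if v[i] >= st2:
-- 				if v[i]>base2:
-- 					break
-- 			else:
-- 				t1.append(t[i])
--
-- 		else:
-- 			t1 = []
-- 	t90 = t1[-1]-t1[0]
-- 	return t90,t1[0],t1[-1]
-- ===== SOURCE B (Python) =====
-- def found_txx(t, v, st1, st2, base2):
--     n = len(t)
--     # termination index: first i where the original loop breaks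
--     end = n
--     for i in range(n):
--         if v[i] >= st1 and v[i] >= st2 and v[i] > base2:
--             end = i
--             break
--     # last reset index before end (or -1 if none)
--     r = -1
--     for i in range(end - 1, -1, -1):
--         if v[i] < st1:
--             r = i
--             break
--     # surviving window
--     t1 = [t[i] for i in range(r + 1, end) if st1 <= v[i] < st2]
--     return t1[-1] - t1[0], t1[0], t1[-1]
-- ===== Notes on version B (the rewrite author's own statement) =====
-- stated objective: alternative
-- what changed: A's single stateful loop that accumulates t1 and resets it on every sub-threshold sample is replaced by three independent scans: find the break index, find the last reset index before it by a backward scan, then filter the surviving window with one comprehension.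
import Mathlib
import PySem

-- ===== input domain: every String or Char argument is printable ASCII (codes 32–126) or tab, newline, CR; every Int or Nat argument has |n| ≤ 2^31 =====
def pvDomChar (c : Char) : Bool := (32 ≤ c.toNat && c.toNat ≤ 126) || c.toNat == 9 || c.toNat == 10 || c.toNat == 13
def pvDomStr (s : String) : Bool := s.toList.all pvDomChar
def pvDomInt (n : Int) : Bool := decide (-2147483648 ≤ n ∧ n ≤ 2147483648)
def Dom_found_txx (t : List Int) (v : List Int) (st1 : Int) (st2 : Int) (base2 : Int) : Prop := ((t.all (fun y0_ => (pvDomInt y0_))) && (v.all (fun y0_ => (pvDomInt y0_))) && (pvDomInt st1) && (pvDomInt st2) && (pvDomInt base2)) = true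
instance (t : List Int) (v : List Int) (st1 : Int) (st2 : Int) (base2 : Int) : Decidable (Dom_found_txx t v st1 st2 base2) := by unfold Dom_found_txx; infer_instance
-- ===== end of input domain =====

-- B replaces A's single stateful reset-and-accumulate loop by three independent scans
-- (find the break index, find the last reset before it, filter the surviving window);
-- same O(n) cost, different decomposition (objective: alternative).
-- Where Python raises IndexError (v shorter than t reached, or empty window) both ports
-- use in-range defaults; those inputs are excluded by Pre_found_txx.

-- ===== PORT A =====
-- the for-loop of A: i runs over range(len(t)), t1 is the accumulator; v[i]/t[i] are
-- in range for every reached i on Pre_ inputs, so List.getD is exact there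
def aGo (t v : List Int) (st1 st2 base2 : Int) (i : Nat) (t1 : List Int) : List Int :=
  if _h : i < t.length then
    if st1 ≤ v.getD i 0 then
      if st2 ≤ v.getD i 0 then
        if base2 < v.getD i 0 then t1                         -- break
        else aGo t v st1 st2 base2 (i+1) t1
      else aGo t v st1 st2 base2 (i+1) (t1 ++ [t.getD i 0])   -- t1.append(t[i])
    else aGo t v st1 st2 base2 (i+1) []                       -- t1 = []
  else t1
termination_by t.length - i

def found_txx (t : List Int) (v : List Int) (st1 : Int) (st2 : Int) (base2 : Int) : Int × Int × Int :=
  let t1 := aGo t v st1 st2 base2 0 []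
  -- t1[-1], t1[0]: t1 is nonempty on Pre_ inputs, so the defaults are never used there
  let last := (PySem.List.pyGet? t1 (-1)).getD 0
  let first := (PySem.List.pyGet? t1 0).getD 0
  (last - first, first, last)

-- ===== PORT B =====
-- Source B's first loop: first index where the compound break condition fires, else len(t)
def bEnd (t v : List Int) (st1 st2 base2 : Int) (i : Nat) : Nat :=
  if _h : i < t.length then
    if st1 ≤ v.getD i 0 ∧ st2 ≤ v.getD i 0 ∧ base2 < v.getD i 0 then i
    else bEnd t v st1 st2 base2 (i+1)
  else t.length
termination_by t.length - i

-- Source B's second loop: for i in range(end-1, -1, -1): if v[i] < st1: return i; else -1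
def bLastReset (v : List Int) (st1 : Int) : Nat → Int
  | 0 => -1
  | j+1 => if v.getD j 0 < st1 then (j : Int) else bLastReset v st1 j

def found_txx_alt (t : List Int) (v : List Int) (st1 : Int) (st2 : Int) (base2 : Int) : Int × Int × Int :=
  let e := bEnd t v st1 st2 base2 0
  let r := bLastReset v st1 e
  -- [t[i] for i in range(r+1, end) if st1 <= v[i] < st2]
  let t1 := (PySem.List.pyRange (r+1) (e : Int) 1).filterMap
      (fun i => if st1 ≤ v.getD i.toNat 0 ∧ v.getD i.toNat 0 < st2 then some (t.getD i.toNat 0) else none)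
  let last := (PySem.List.pyGet? t1 (-1)).getD 0
  let first := (PySem.List.pyGet? t1 0).getD 0
  (last - first, first, last)

-- ===== PRECONDITION & SPEC =====
-- the break condition of A's loop at index k
def pvBrk (v : List Int) (st1 st2 base2 : Int) (k : Nat) : Bool :=
  decide (st1 ≤ v.getD k 0) && decide (st2 ≤ v.getD k 0) && decide (base2 < v.getD k 0)

-- Exactly the inputs on which the Python A returns (no IndexError): either v covers t or
-- the loop breaks before v runs out, and some appended element survives to the end
-- (a kept index i with no break at or before it, and every later reset lies past a break).
def Pre_found_txx (t : List Int) (v : List Int) (st1 : Int) (st2 : Int) (base2 : Int) : Prop :=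
  ((decide (t.length ≤ v.length)
      || (List.range t.length).any (fun k => decide (k < v.length) && pvBrk v st1 st2 base2 k))
    && (List.range t.length).any (fun i =>
        decide (st1 ≤ v.getD i 0) && decide (v.getD i 0 < st2)
        && ((List.range (i+1)).all (fun k => !pvBrk v st1 st2 base2 k))
        && ((List.range t.length).all (fun j =>
              !(decide (i < j) && decide (v.getD j 0 < st1))
              || (List.range (j+1)).any (fun k => decide (i < k) && pvBrk v st1 st2 base2 k))))) = true

instance (t : List Int) (v : List Int) (st1 : Int) (st2 : Int) (base2 : Int) : Decidable (Pre_found_txx t v st1 st2 base2) := by unfold Pre_found_txx; infer_instance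

def pvWitness_found_txx : List Int × List Int × Int × Int × Int := ([0, 1], [5, 5], 0, 10, 0)

def Spec_found_txx (t : List Int) (v : List Int) (st1 : Int) (st2 : Int) (base2 : Int) (out : Int × Int × Int) : Prop := out = found_txx_alt t v st1 st2 base2
instance (t : List Int) (v : List Int) (st1 : Int) (st2 : Int) (base2 : Int) (out : Int × Int × Int) : Decidable (Spec_found_txx t v st1 st2 base2 out) := by unfold Spec_found_txx; infer_instance

-- ===== CLAIM (what is proved, stated in full; the proofs are below) =====
def Claim_equal_found_txx : Prop := ∀ (t : List Int) (v : List Int) (st1 : Int) (st2 : Int) (base2 : Int), Dom_found_txx t v st1 st2 base2 → Pre_found_txx t v st1 st2 base2 → Spec_found_txx t v st1 st2 base2 (found_txx t v st1 st2 base2)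

-- ===== LEMMAS AND PROOFS =====

-- the filtered window over the Nat range [a, e), proof-side normal form of both ports' t1
def collectW (t v : List Int) (st1 st2 : Int) (a e : Nat) : List Int :=
  (List.range' a (e - a)).filterMap
    (fun i => if st1 ≤ v.getD i 0 ∧ v.getD i 0 < st2 then some (t.getD i 0) else none)

lemma collectW_nil (t v : List Int) (st1 st2 : Int) (a e : Nat) (h : e ≤ a) :
    collectW t v st1 st2 a e = [] := by
  unfold collectW
  rw [Nat.sub_eq_zero_of_le h]
  rfl

lemma collectW_cons (t v : List Int) (st1 st2 : Int) (a e : Nat) (h : a < e) :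
    collectW t v st1 st2 a e =
      (if st1 ≤ v.getD a 0 ∧ v.getD a 0 < st2 then [t.getD a 0] else []) ++
        collectW t v st1 st2 (a+1) e := by
  unfold collectW
  have h1 : e - a = (e - (a+1)) + 1 := by omega
  rw [h1, List.range'_succ, List.filterMap_cons]
  split_ifs <;> simp

lemma bEnd_le (t v : List Int) (st1 st2 base2 : Int) :
    ∀ i, bEnd t v st1 st2 base2 i ≤ t.length := by
  intro i
  induction hn : t.length - i generalizing i with
  | zero => rw [bEnd]; rw [dif_neg (by omega)]
  | succ n ih =>
    rw [bEnd, dif_pos (by omega : i < t.length)]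
    split_ifs with hb
    · omega
    · exact ih (i+1) (by omega)

lemma bEnd_ge (t v : List Int) (st1 st2 base2 : Int) :
    ∀ i, i ≤ t.length → i ≤ bEnd t v st1 st2 base2 i := by
  intro i
  induction hn : t.length - i generalizing i with
  | zero => intro hi; rw [bEnd]; rw [dif_neg (by omega)]; omega
  | succ n ih =>
    intro hi
    rw [bEnd, dif_pos (by omega : i < t.length)]
    split_ifs with hb
    · omega
    · have := ih (i+1) (by omega) (by omega)
      omega

lemma bEnd_brk (t v : List Int) (st1 st2 base2 : Int) (i : Nat)
    (h : i < t.length) (hb : st1 ≤ v.getD i 0 ∧ st2 ≤ v.getD i 0 ∧ base2 < v.getD i 0) :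
    bEnd t v st1 st2 base2 i = i := by
  rw [bEnd, dif_pos h, if_pos hb]

lemma bEnd_step (t v : List Int) (st1 st2 base2 : Int) (i : Nat)
    (h : i < t.length) (hb : ¬ (st1 ≤ v.getD i 0 ∧ st2 ≤ v.getD i 0 ∧ base2 < v.getD i 0)) :
    bEnd t v st1 st2 base2 i = bEnd t v st1 st2 base2 (i+1) := by
  rw [bEnd, dif_pos h, if_neg hb]

-- B's Int-range comprehension equals the Nat-range window
lemma bridge (t v : List Int) (st1 st2 : Int) :
    ∀ (e k : Nat),
      (PySem.List.pyRange (k : Int) (e : Int) 1).filterMap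
        (fun i => if st1 ≤ v.getD i.toNat 0 ∧ v.getD i.toNat 0 < st2 then some (t.getD i.toNat 0) else none)
      = collectW t v st1 st2 k e := by
  intro e k
  induction hn : e - k generalizing k with
  | zero =>
    rw [PySem.List.pyRange_one_eq_nil (by exact_mod_cast Nat.le_of_sub_eq_zero hn)]
    rw [collectW_nil t v st1 st2 k e (by omega)]
    rfl
  | succ n ih =>
    have hk : k < e := by omega
    rw [PySem.List.pyRange_one_cons (by exact_mod_cast hk)]
    rw [List.filterMap_cons]
    have hc : ((k : Int) + 1) = ((k + 1 : Nat) : Int) := by push_cast; ring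
    rw [hc, ih (k+1) (by omega)]
    rw [collectW_cons t v st1 st2 k e hk]
    simp only [Int.toNat_natCast]
    split_ifs <;> simp

-- A's loop when no reset happens before the break index: pure accumulation
lemma aGo_no_reset (t v : List Int) (st1 st2 base2 : Int) :
    ∀ (i : Nat) (t1 : List Int),
      (∀ j, i ≤ j → j < bEnd t v st1 st2 base2 i → ¬ v.getD j 0 < st1) →
      aGo t v st1 st2 base2 i t1 = t1 ++ collectW t v st1 st2 i (bEnd t v st1 st2 base2 i) := by
  intro i
  induction hn : t.length - i generalizing i with
  | zero =>
    intro t1 _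
    rw [aGo, dif_neg (by omega)]
    rw [bEnd, dif_neg (by omega)]
    rw [collectW_nil t v st1 st2 i t.length (by omega)]
    simp
  | succ n ih =>
    intro t1 hnr
    have hi : i < t.length := by omega
    rw [aGo, dif_pos hi]
    by_cases h1 : st1 ≤ v.getD i 0
    · rw [if_pos h1]
      by_cases h2 : st2 ≤ v.getD i 0
      · rw [if_pos h2]
        by_cases h3 : base2 < v.getD i 0
        · -- break
          rw [if_pos h3]
          rw [bEnd_brk t v st1 st2 base2 i hi ⟨h1, h2, h3⟩]
          rw [collectW_nil t v st1 st2 i i (le_refl i)]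
          simp
        · -- skip
          rw [if_neg h3]
          have hstep := bEnd_step t v st1 st2 base2 i hi (by tauto)
          have hge : i + 1 ≤ bEnd t v st1 st2 base2 (i+1) :=
            bEnd_ge t v st1 st2 base2 (i+1) (by omega)
          rw [ih (i+1) (by omega) t1 (by intro j hj1 hj2; exact hnr j (by omega) (by rw [hstep]; exact hj2))]
          rw [hstep, collectW_cons t v st1 st2 i _ (by omega)]
          rw [if_neg (by omega)]
          simp
      · -- append
        rw [if_neg h2]
        have hstep := bEnd_step t v st1 st2 base2 i hi (by tauto)
        have hge : i + 1 ≤ bEnd t v st1 st2 base2 (i+1) :=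
          bEnd_ge t v st1 st2 base2 (i+1) (by omega)
        rw [ih (i+1) (by omega) (t1 ++ [t.getD i 0]) (by intro j hj1 hj2; exact hnr j (by omega) (by rw [hstep]; exact hj2))]
        rw [hstep, collectW_cons t v st1 st2 i _ (by omega)]
        rw [if_pos ⟨h1, by omega⟩]
        simp
    · -- reset: contradicts the no-reset hypothesis at j = i
      exfalso
      have hstep := bEnd_step t v st1 st2 base2 i hi (by tauto)
      have hge : i + 1 ≤ bEnd t v st1 st2 base2 (i+1) :=
        bEnd_ge t v st1 st2 base2 (i+1) (by omega)
      exact hnr i (le_refl i) (by omega) (by omega)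

-- A's loop when rr is the last reset before the break index: the accumulator is discarded
lemma aGo_reset (t v : List Int) (st1 st2 base2 : Int) :
    ∀ (i : Nat) (t1 : List Int) (rr : Nat),
      i ≤ rr → rr < bEnd t v st1 st2 base2 i → v.getD rr 0 < st1 →
      (∀ j, rr < j → j < bEnd t v st1 st2 base2 i → ¬ v.getD j 0 < st1) →
      aGo t v st1 st2 base2 i t1 = collectW t v st1 st2 (rr+1) (bEnd t v st1 st2 base2 i) := by
  intro i
  induction hn : t.length - i generalizing i with
  | zero =>
    intro t1 rr h1 h2 _ _
    have := bEnd_le t v st1 st2 base2 i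
    omega
  | succ n ih =>
    intro t1 rr hir hre hrst hnr
    have hle := bEnd_le t v st1 st2 base2 i
    have hi : i < t.length := by omega
    rw [aGo, dif_pos hi]
    by_cases hb : st1 ≤ v.getD i 0 ∧ st2 ≤ v.getD i 0 ∧ base2 < v.getD i 0
    · exfalso
      rw [bEnd_brk t v st1 st2 base2 i hi hb] at hre
      omega
    · have hstep := bEnd_step t v st1 st2 base2 i hi hb
      by_cases hieq : i = rr
      · -- reset exactly here; afterwards no reset, pure accumulation from []
        subst hieq
        rw [if_neg (by omega)]
        rw [aGo_no_reset t v st1 st2 base2 (i+1) []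
          (by intro j hj1 hj2; exact hnr j (by omega) (by rw [hstep]; exact hj2))]
        rw [hstep]
        simp
      · have hir' : i + 1 ≤ rr := by omega
        have hre' : rr < bEnd t v st1 st2 base2 (i+1) := by rw [← hstep]; exact hre
        have hnr' : ∀ j, rr < j → j < bEnd t v st1 st2 base2 (i+1) → ¬ v.getD j 0 < st1 := by
          intro j hj1 hj2; exact hnr j hj1 (by rw [hstep]; exact hj2)
        by_cases h1 : st1 ≤ v.getD i 0
        · rw [if_pos h1]
          by_cases h2 : st2 ≤ v.getD i 0
          · rw [if_pos h2]
            rw [if_neg (by tauto)]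
            rw [ih (i+1) (by omega) t1 rr hir' hre' hrst hnr', hstep]
          · rw [if_neg h2]
            rw [ih (i+1) (by omega) (t1 ++ [t.getD i 0]) rr hir' hre' hrst hnr', hstep]
        · rw [if_neg h1]
          rw [ih (i+1) (by omega) [] rr hir' hre' hrst hnr', hstep]

-- Source B's backward scan: either no reset below j, or it returns the largest reset index below j
lemma bLastReset_spec (v : List Int) (st1 : Int) :
    ∀ j : Nat,
      (bLastReset v st1 j = -1 ∧ ∀ k, k < j → ¬ v.getD k 0 < st1) ∨
      (∃ k, k < j ∧ bLastReset v st1 j = (k : Int) ∧ v.getD k 0 < st1 ∧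
        ∀ m, k < m → m < j → ¬ v.getD m 0 < st1) := by
  intro j
  induction j with
  | zero => left; exact ⟨rfl, by omega⟩
  | succ j ih =>
    by_cases hr : v.getD j 0 < st1
    · right
      exact ⟨j, by omega, by rw [bLastReset, if_pos hr], hr, by intro m h1 h2; omega⟩
    · rcases ih with ⟨he, hall⟩ | ⟨k, hk1, hk2, hk3, hk4⟩
      · left
        refine ⟨by rw [bLastReset, if_neg hr]; exact he, ?_⟩
        intro k hk
        rcases Nat.lt_succ_iff_lt_or_eq.mp hk with h | h
        · exact hall k h
        · rw [h]; exact hr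
      · right
        refine ⟨k, by omega, by rw [bLastReset, if_neg hr]; exact hk2, hk3, ?_⟩
        intro m h1 h2
        rcases Nat.lt_succ_iff_lt_or_eq.mp h2 with h | h
        · exact hk4 m h1 h
        · rw [h]; exact hr

-- the two t1 lists coincide
lemma t1_eq (t v : List Int) (st1 st2 base2 : Int) :
    aGo t v st1 st2 base2 0 [] =
      (PySem.List.pyRange (bLastReset v st1 (bEnd t v st1 st2 base2 0) + 1)
          ((bEnd t v st1 st2 base2 0 : Nat) : Int) 1).filterMap
        (fun i => if st1 ≤ v.getD i.toNat 0 ∧ v.getD i.toNat 0 < st2 then some (t.getD i.toNat 0) else none) := by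
  rcases bLastReset_spec v st1 (bEnd t v st1 st2 base2 0) with ⟨he, hall⟩ | ⟨k, hk1, hk2, hk3, hk4⟩
  · rw [he]
    have h0 : (-1 : Int) + 1 = ((0 : Nat) : Int) := by norm_num
    rw [h0, bridge]
    rw [aGo_no_reset t v st1 st2 base2 0 [] (by intro j _ hj2; exact hall j hj2)]
    simp
  · rw [hk2]
    have h0 : (k : Int) + 1 = ((k + 1 : Nat) : Int) := by push_cast; ring
    rw [h0, bridge]
    exact aGo_reset t v st1 st2 base2 0 [] k (by omega) hk1 hk3 hk4

-- ===== VERDICT (by name: the statement is the Claim_ definition above) =====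
theorem found_txx_spec : Claim_equal_found_txx := by
  intro t v st1 st2 base2 _ _
  unfold Spec_found_txx found_txx found_txx_alt
  rw [t1_eq]
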